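-- pv_equiv track=rewrite | github.com/Dominik2122/advent-of-code-2022 | day2/day2.py | resolve_player_choice
-- ===== SOURCE A (Python) =====
-- class Game:
--     Rock = 0
--     Scissors = 1
--     Paper = 2
--
--     @staticmethod
--     def winning_pairs():
--         return [(Game.Rock, Game.Paper), (Game.Paper, Game.Scissors), (Game.Scissors, Game.Rock)]
--
--     @staticmethod
--     def get_player_choice_points(choice):
--         if choice == Game.Rock:
--             return 1
--         elif choice == Game.Paper:
--             return 2
--         else:
--             return 3
--
--     @staticmethod
--     def get_battle_score(elf_choice, player_choice):
--         if elf_choice == player_choice: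
--             return 3
--
--         for pair in Game.winning_pairs():
--             if elf_choice == pair[0] and player_choice == pair[1]:
--                 return 6
--         return 0
--
-- def resolve_player_choice(elf_choice, required_result):
--     if required_result == 'X':
--         for pair in Game.winning_pairs():
--             if elf_choice == pair[1]:
--                 return pair[0]
--
--     if required_result == 'Y':
--         return elf_choice
--
--     if required_result == 'Z':
--         for pair in Game.winning_pairs():
--             if elf_choice == pair[0]:
--                 return pair[1]
-- ===== SOURCE B (Python) =====
-- def resolve_player_choice(elf_choice, required_result):
--     if required_result == 'Y':
--         return elf_choice
--     if elf_choice in (0, 1, 2):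
--         if required_result == 'X':
--             return (elf_choice + 1) % 3
--         if required_result == 'Z':
--             return (elf_choice - 1) % 3
--     return None
-- ===== Notes on version B (the rewrite author's own statement) =====
-- stated objective: idiomatic
-- what changed: Replaces the winning_pairs list scans with modular arithmetic on the cyclic beats relation ((elf+1)%3 to lose, (elf-1)%3 to win), guarded by a membership check on valid choices.
import Mathlib
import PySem

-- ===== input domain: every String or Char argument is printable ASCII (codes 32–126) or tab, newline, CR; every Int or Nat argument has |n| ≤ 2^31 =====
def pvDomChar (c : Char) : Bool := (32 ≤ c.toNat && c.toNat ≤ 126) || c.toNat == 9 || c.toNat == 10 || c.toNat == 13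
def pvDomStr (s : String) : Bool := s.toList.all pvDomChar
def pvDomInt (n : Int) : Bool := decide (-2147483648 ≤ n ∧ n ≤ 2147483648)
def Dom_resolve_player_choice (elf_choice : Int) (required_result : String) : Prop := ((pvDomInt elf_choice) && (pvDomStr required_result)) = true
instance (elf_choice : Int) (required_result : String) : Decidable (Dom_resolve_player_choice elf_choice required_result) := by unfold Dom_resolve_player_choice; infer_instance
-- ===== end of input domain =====

-- B replaces A's winning_pairs list scans with modular arithmetic on the cyclic beats relation (idiomatic).
-- ===== PORT A =====
def winning_pairs : List (Int × Int) := [(0, 2), (2, 1), (1, 0)]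

-- the 'X' loop: first pair with elf_choice == pair[1], returning pair[0]
def findLoseA (elf_choice : Int) : List (Int × Int) → Option Int
  | [] => none
  | p :: rest => if elf_choice = p.2 then some p.1 else findLoseA elf_choice rest

-- the 'Z' loop: first pair with elf_choice == pair[0], returning pair[1]
def findWinA (elf_choice : Int) : List (Int × Int) → Option Int
  | [] => none
  | p :: rest => if elf_choice = p.1 then some p.2 else findWinA elf_choice rest

def resolve_player_choice (elf_choice : Int) (required_result : String) : Option Int :=
  match (if required_result = "X" then findLoseA elf_choice winning_pairs else none) with
  | some v => some v
  | none =>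
    if required_result = "Y" then some elf_choice
    else if required_result = "Z" then findWinA elf_choice winning_pairs
    else none

-- ===== PORT B =====
def resolve_player_choice_alt (elf_choice : Int) (required_result : String) : Option Int :=
  if required_result = "Y" then some elf_choice
  else if elf_choice = 0 ∨ elf_choice = 1 ∨ elf_choice = 2 then
    if required_result = "X" then some (PySem.Int.mod (elf_choice + 1) 3)
    else if required_result = "Z" then some (PySem.Int.mod (elf_choice - 1) 3)
    else none
  else none

-- ===== PRECONDITION & SPEC =====
def Spec_resolve_player_choice (elf_choice : Int) (required_result : String) (out : Option Int) : Prop := out = resolve_player_choice_alt elf_choice required_result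
instance (elf_choice : Int) (required_result : String) (out : Option Int) : Decidable (Spec_resolve_player_choice elf_choice required_result out) := by unfold Spec_resolve_player_choice; infer_instance

-- ===== CLAIM (what is proved, stated in full; the proofs are below) =====
def Claim_equal_resolve_player_choice : Prop := ∀ (elf_choice : Int) (required_result : String), Dom_resolve_player_choice elf_choice required_result → Spec_resolve_player_choice elf_choice required_result (resolve_player_choice elf_choice required_result)

-- ===== LEMMAS AND PROOFS =====

-- ===== VERDICT (by name: the statement is the Claim_ definition above) =====
theorem resolve_player_choice_spec : Claim_equal_resolve_player_choice := by
  intro e r _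
  unfold Spec_resolve_player_choice resolve_player_choice resolve_player_choice_alt
  by_cases hY : r = "Y"
  · simp [hY, findLoseA]
  · by_cases hX : r = "X"
    · subst hX
      rcases em (e = 0 ∨ e = 1 ∨ e = 2) with h | h
      · rcases h with h | h | h <;> subst h <;> decide
      · push_neg at h
        simp [winning_pairs, findLoseA, h.1, h.2.1, h.2.2, hY]
    · by_cases hZ : r = "Z"
      · subst hZ
        rcases em (e = 0 ∨ e = 1 ∨ e = 2) with h | h
        · rcases h with h | h | h <;> subst h <;> decide
        · push_neg at h
          simp [winning_pairs, findWinA, h.1, h.2.1, h.2.2, hY]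
      · simp [hX, hY, hZ]
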